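-- pv_equiv track=rewrite | github.com/seangerrykelly/leetcode-problems | isomorphicStrings.py | generateOrderString
-- ===== SOURCE A (Python) =====
-- def generateOrderString(word):
--     letterMap = {}
--     currIndex = 1
--     newWord = ""
--     for i in range(len(word)):
--         letter = word[i]
--         if letter not in letterMap:
--             letterMap[letter] = currIndex
--             currIndex += 1
--         newWord += str(letterMap[letter])
--     return newWord
-- ===== SOURCE B (Python) =====
-- def generateOrderString(word):
--     rank = {c: len(set(word[:word.index(c) + 1])) for c in set(word)}
--     return "".join(str(rank[c]) for c in word)
-- ===== Notes on version B (the rewrite author's own statement) =====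
-- stated objective: alternative
-- what changed: B keeps no running counter: each distinct character's code is computed independently by a closed form -- the number of distinct characters in the prefix of word up to and including that character's first occurrence, len(set(word[:word.index(c)+1])) -- memoized per distinct character and then joined, instead of A's single stateful pass that grows a map and the output together.
import Mathlib
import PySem

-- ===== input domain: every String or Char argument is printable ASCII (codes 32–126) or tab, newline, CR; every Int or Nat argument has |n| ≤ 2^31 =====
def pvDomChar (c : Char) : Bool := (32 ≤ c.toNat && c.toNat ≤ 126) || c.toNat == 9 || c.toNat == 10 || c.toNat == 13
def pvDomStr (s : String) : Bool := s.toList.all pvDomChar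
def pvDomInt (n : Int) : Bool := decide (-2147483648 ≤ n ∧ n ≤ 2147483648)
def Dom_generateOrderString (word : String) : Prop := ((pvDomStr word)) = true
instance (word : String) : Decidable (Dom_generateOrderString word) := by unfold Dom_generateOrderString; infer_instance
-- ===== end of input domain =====

-- B replaces A's stateful pass (growing dict + running counter) by a stateless closed form,
-- memoized per distinct character: each code is the number of distinct characters up to and
-- including that character's first occurrence (alternative algorithm; no speed claim).


-- ===== PORT A =====
-- the for-loop over word[i] for i in range(len(word)), with state (letterMap, currIndex, newWord);
-- letterMap[letter] after a possible insert is ported as getD with an unreachable default 0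
def pvLoopA : List Char → PySem.Dict Char Int → Int → String → String
  | [], _, _, newWord => newWord
  | letter :: rest, letterMap, currIndex, newWord =>
    if letterMap.contains letter then
      pvLoopA rest letterMap currIndex (newWord ++ PySem.Int.toStr (letterMap.getD letter 0))
    else
      pvLoopA rest (letterMap.insert letter currIndex) (currIndex + 1)
        (newWord ++ PySem.Int.toStr ((letterMap.insert letter currIndex).getD letter 0))

def generateOrderString (word : String) : String :=
  pvLoopA word.toList PySem.Dict.empty 1 ""

-- ===== PORT B =====
-- rank = {c: len(set(word[:word.index(c) + 1])) for c in set(word)}; "".join(str(rank[c]) for c in word).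
-- word.index(c) always hits (c is drawn from word), so index? … |>.getD 0 is exact here;
-- the dict is only looked up afterwards and its values depend on c alone, so iterating the set is order-safe;
-- rank[c] always hits (every c of word is a key), so getD's default 0 is unreachable
def generateOrderString_alt (word : String) : String :=
  let rank : PySem.Dict Char Int :=
    (PySem.Set.ofList word.toList).foldl
      (fun d c => d.insert c ((PySem.Set.len (PySem.Set.ofList
        (PySem.List.slice word.toList none
          (some ((((PySem.List.index? word.toList c).getD 0 : Nat) : Int) + 1)))) : Int)))
      PySem.Dict.empty
  PySem.Str.join "" (word.toList.map (fun c => PySem.Int.toStr (rank.getD c 0)))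

-- ===== PRECONDITION & SPEC =====
def Spec_generateOrderString (word : String) (out : String) : Prop := out = generateOrderString_alt word
instance (word : String) (out : String) : Decidable (Spec_generateOrderString word out) := by unfold Spec_generateOrderString; infer_instance

-- ===== CLAIM (what is proved, stated in full; the proofs are below) =====
def Claim_equal_generateOrderString : Prop := ∀ (word : String), Dom_generateOrderString word → Spec_generateOrderString word (generateOrderString word)

-- ===== LEMMAS AND PROOFS =====

-- the dict mapping the k-th element (0-based) of `seen` to k+1, as A's loop builds it
def pvMapOf (seen : List Char) : PySem.Dict Char Int :=
  PySem.Dict.mk ((PySem.List.enumerate seen 1).map (fun p => (p.2, p.1)))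

-- common reference rendering: process `rest` with `seen` = distinct chars already seen, in order
def pvCanon (seen : List Char) : List Char → List Char
  | [] => []
  | c :: rest =>
    if c ∈ seen then
      PySem.Int.toChars (((PySem.List.index? seen c).getD 0 : Nat) + 1) ++ pvCanon seen rest
    else
      PySem.Int.toChars ((seen.length : Int) + 1) ++ pvCanon (seen ++ [c]) rest

-- B's closed form for one character, on the list side
def pvRank (full : List Char) (c : Char) : Nat :=
  (PySem.Set.ofList (full.take (((PySem.List.index? full c).getD 0) + 1))).length

theorem pvMapOf_get? (seen : List Char) (s : Int) (c : Char) :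
    (PySem.Dict.mk ((PySem.List.enumerate seen s).map (fun p => (p.2, p.1)))).get? c
      = (PySem.List.index? seen c).map (fun k => s + (k : Int)) := by
  induction seen generalizing s with
  | nil => simp [PySem.List.enumerate_nil, PySem.Dict.get?, PySem.List.index?]
  | cons x t ih =>
    rw [PySem.List.enumerate_cons, List.map_cons]
    by_cases hx : x = c
    · subst hx
      rw [PySem.List.index?_cons_self, PySem.Dict.get?_mk_cons]
      simp
    · rw [PySem.List.index?_cons_of_ne t hx, PySem.Dict.get?_mk_cons]
      simp only [beq_iff_eq, hx, if_false, ih (s + 1)]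
      cases PySem.List.index? t c
      · simp
      · simp; ring

theorem pvMapOf_contains (seen : List Char) (c : Char) :
    (pvMapOf seen).contains c = true ↔ c ∈ seen := by
  rw [pvMapOf, PySem.Dict.contains]
  simp only [List.any_map]
  rw [List.any_eq_true]
  constructor
  · rintro ⟨p, hp, h⟩
    have h2 : p.2 ∈ (PySem.List.enumerate seen 1).map (·.2) := List.mem_map_of_mem hp
    rw [PySem.List.map_snd_enumerate] at h2
    have h3 : p.2 = c := by simpa using h
    rwa [h3] at h2
  · intro h
    rw [← PySem.List.map_snd_enumerate seen 1] at h
    obtain ⟨p, hp, hpc⟩ := List.mem_map.mp h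
    exact ⟨p, hp, by simpa using hpc⟩

theorem pvMapOf_insert (seen : List Char) (c : Char) (h : c ∉ seen) :
    (pvMapOf seen).insert c ((seen.length : Int) + 1) = pvMapOf (seen ++ [c]) := by
  have hc : (pvMapOf seen).contains c = false := by
    cases hcc : (pvMapOf seen).contains c
    · rfl
    · exact absurd ((pvMapOf_contains seen c).mp hcc) h
  rw [PySem.Dict.insert, hc]
  simp only [Bool.false_eq_true, if_false, pvMapOf]
  rw [PySem.List.enumerate_append]
  simp [PySem.List.enumerate_cons, PySem.List.enumerate_nil]
  omega

theorem pvMapOf_getD_mem (seen : List Char) (c : Char) (h : c ∈ seen) :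
    (pvMapOf seen).getD c 0 = (((PySem.List.index? seen c).getD 0 : Nat) : Int) + 1 := by
  obtain ⟨k, hk⟩ := Option.isSome_iff_exists.mp ((PySem.List.index?_isSome_iff seen c).mpr h)
  rw [PySem.Dict.getD, pvMapOf, pvMapOf_get? seen 1 c, hk]
  simp
  omega

-- A's loop, run with the map for `seen`, appends the canonical rendering of `rest`
theorem pvLoopA_canon (rest : List Char) :
    ∀ (seen : List Char) (acc : String),
      (pvLoopA rest (pvMapOf seen) ((seen.length : Int) + 1) acc).toList
        = acc.toList ++ pvCanon seen rest := by
  induction rest with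
  | nil => intro seen acc; simp [pvLoopA, pvCanon]
  | cons c rest ih =>
    intro seen acc
    by_cases hmem : c ∈ seen
    · have hc : (pvMapOf seen).contains c = true := (pvMapOf_contains seen c).mpr hmem
      simp only [pvLoopA, hc, if_true]
      rw [ih seen]
      simp [pvCanon, hmem, pvMapOf_getD_mem seen c hmem, PySem.Int.toList_toStr]
    · have hc : (pvMapOf seen).contains c = false := by
        cases hcc : (pvMapOf seen).contains c
        · rfl
        · exact absurd ((pvMapOf_contains seen c).mp hcc) hmem
      simp only [pvLoopA, hc, Bool.false_eq_true, if_false]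
      rw [pvMapOf_insert seen c hmem]
      have hlen : (seen.length : Int) + 1 + 1 = ((seen ++ [c]).length : Int) + 1 := by
        simp
      rw [hlen, ih (seen ++ [c])]
      have hval : (pvMapOf (seen ++ [c])).getD c 0 = (seen.length : Int) + 1 := by
        rw [pvMapOf_getD_mem (seen ++ [c]) c (by simp),
            PySem.List.index?_append_singleton_self seen c hmem]
        simp
      simp [pvCanon, hmem, hval, PySem.Int.toList_toStr]

theorem pvJoin_flatten (parts : List (List Char)) :
    PySem.Chars.join [] parts = parts.flatten := by
  induction parts with
  | nil => simp [PySem.Chars.join, List.intercalate]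
  | cons p ps ih =>
    simp [PySem.Chars.join, List.intercalate] at *
    cases ps <;> simp_all [List.intersperse]

theorem pvA_toList (word : String) :
    (generateOrderString word).toList = pvCanon [] word.toList := by
  have h0 : pvMapOf [] = PySem.Dict.empty := by
    simp [pvMapOf, PySem.List.enumerate_nil, PySem.Dict.empty]
  have h1 : ((([] : List Char).length : Int) + 1) = 1 := by simp
  rw [generateOrderString, ← h0, ← h1, pvLoopA_canon word.toList [] ""]
  simp

-- mem case: the rank of an already-seen character equals its 1-based position in the seen set
theorem pvRank_of_mem (pre rest : List Char) (c : Char) (hmem : c ∈ pre) :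
    pvRank (pre ++ rest) c = ((PySem.List.index? (PySem.Set.ofList pre) c).getD 0) + 1 := by
  rw [pvRank, PySem.List.index?_append_of_mem rest hmem]
  obtain ⟨k, hk⟩ := Option.isSome_iff_exists.mp ((PySem.List.index?_isSome_iff pre c).mpr hmem)
  obtain ⟨hklt, hgetc, hfirst⟩ := PySem.List.getElem_of_index?_eq_some hk
  have hnotk : c ∉ pre.take k := by
    intro hmemk
    obtain ⟨j, hj, hjc⟩ := List.mem_iff_getElem.mp hmemk
    have hjk : j < k := lt_of_lt_of_le hj (by simp [List.length_take])
    exact hfirst j hjk (by rw [← hjc]; exact (List.getElem_take).symm)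
  have htake : (pre ++ rest).take (k + 1) = pre.take k ++ [c] := by
    rw [List.take_append_of_le_length (by omega), List.take_add_one]
    simp [List.getElem?_eq_getElem hklt, hgetc]
  have hset1 : PySem.Set.ofList (pre.take k ++ [c]) = PySem.Set.ofList (pre.take k) ++ [c] := by
    rw [PySem.Set.ofList_append_singleton,
        PySem.Set.add_of_not_mem (by rw [PySem.Set.mem_ofList]; exact hnotk)]
  -- the seen set extends ofList (pre.take (k+1)) on the right
  have hsplit : pre = pre.take (k + 1) ++ pre.drop (k + 1) := (List.take_append_drop _ _).symm
  have hof : PySem.Set.ofList pre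
      = PySem.Set.update (PySem.Set.ofList (pre.take (k + 1))) (pre.drop (k + 1)) := by
    conv_lhs => rw [hsplit]
    exact PySem.Set.ofList_append _ _
  have htake1 : pre.take (k + 1) = pre.take k ++ [c] := by
    rw [List.take_add_one]; simp [List.getElem?_eq_getElem hklt, hgetc]
  have hidx : PySem.List.index? (PySem.Set.ofList pre) c
      = some (PySem.Set.ofList (pre.take k)).length := by
    rw [hof, PySem.Set.update_eq_append_filter, htake1, hset1,
        PySem.List.index?_append_of_mem _ (by simp),
        PySem.List.index?_append_singleton_self _ c
          (by rw [PySem.Set.mem_ofList]; exact hnotk)]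
  rw [hk, hidx]
  simp only [Option.getD_some, htake, hset1]
  simp

-- new-character case: the rank is one more than the number of distinct characters before it
theorem pvRank_of_not_mem (pre rest : List Char) (c : Char) (hmem : c ∉ pre) :
    pvRank (pre ++ c :: rest) c = (PySem.Set.ofList pre).length + 1 := by
  have hidx : PySem.List.index? (pre ++ c :: rest) c = some pre.length :=
    (PySem.List.index?_eq_some_iff _ _ _).mpr ⟨pre, rest, rfl, rfl, hmem⟩
  have htake : (pre ++ c :: rest).take (pre.length + 1) = pre ++ [c] := by
    rw [List.take_append]
    simp
  rw [pvRank, hidx]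
  simp only [Option.getD_some, htake]
  rw [PySem.Set.ofList_append_singleton,
      PySem.Set.add_of_not_mem (by rw [PySem.Set.mem_ofList]; exact hmem)]
  simp

-- the canonical rendering is the per-character closed-form rendering
theorem pvCanon_rank (full : List Char) : ∀ (rest pre : List Char), pre ++ rest = full →
    pvCanon (PySem.Set.ofList pre) rest
      = (rest.map (fun c => PySem.Int.toChars ((pvRank full c : Int)))).flatten := by
  intro rest
  induction rest with
  | nil => intro pre _; simp [pvCanon]
  | cons c rest ih =>
    intro pre hfull
    by_cases hmem : c ∈ pre
    · have hseen : c ∈ PySem.Set.ofList pre := by rw [PySem.Set.mem_ofList]; exact hmem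
      have hpre' : (pre ++ [c]) ++ rest = full := by simpa using hfull
      have hset : PySem.Set.ofList (pre ++ [c]) = PySem.Set.ofList pre := by
        rw [PySem.Set.ofList_append_singleton, PySem.Set.add_of_mem hseen]
      have hrank : pvRank full c
          = ((PySem.List.index? (PySem.Set.ofList pre) c).getD 0) + 1 := by
        rw [← hfull]; exact pvRank_of_mem pre (c :: rest) c hmem
      have hrest := ih (pre ++ [c]) hpre'
      rw [hset] at hrest
      simp only [pvCanon, hseen, if_true, List.map_cons, List.flatten_cons, hrest, hrank]
      norm_num
    · have hseen : c ∉ PySem.Set.ofList pre := by rw [PySem.Set.mem_ofList]; exact hmem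
      have hpre' : (pre ++ [c]) ++ rest = full := by simpa using hfull
      have hset : PySem.Set.ofList (pre ++ [c]) = PySem.Set.ofList pre ++ [c] := by
        rw [PySem.Set.ofList_append_singleton, PySem.Set.add_of_not_mem hseen]
      have hrank : pvRank full c = (PySem.Set.ofList pre).length + 1 := by
        rw [← hfull]; exact pvRank_of_not_mem pre rest c hmem
      have hrest := ih (pre ++ [c]) hpre'
      rw [hset] at hrest
      simp only [pvCanon, hseen, if_false, List.map_cons, List.flatten_cons, hrest, hrank]
      norm_num

-- a dict comprehension with key-only values: lookup of a key of l yields its value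
theorem pvGet?_comprehension (f : Char → Int) (l : List Char) (c : Char) :
    ∀ (d : PySem.Dict Char Int),
      (l.foldl (fun d c => d.insert c (f c)) d).get? c
        = if c ∈ l then some (f c) else d.get? c := by
  induction l with
  | nil => intro d; simp
  | cons x t ih =>
    intro d
    simp only [List.foldl_cons, ih]
    by_cases hct : c ∈ t
    · simp [hct, List.mem_cons.mpr (Or.inr hct)]
    · by_cases hx : c = x
      · subst hx
        simp [hct, PySem.Dict.get?_insert_self]
      · simp [hct, hx, PySem.Dict.get?_insert_of_ne _ _ hx]

theorem pvGetD_comprehension (f : Char → Int) (l : List Char) (c : Char) (hc : c ∈ l)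
    (d : PySem.Dict Char Int) :
    (l.foldl (fun d c => d.insert c (f c)) d).getD c 0 = f c := by
  rw [PySem.Dict.getD, pvGet?_comprehension, if_pos hc]
  rfl

theorem pvB_toList (word : String) :
    (generateOrderString_alt word).toList
      = (word.toList.map (fun c => PySem.Int.toChars ((pvRank word.toList c : Int)))).flatten := by
  rw [generateOrderString_alt, PySem.Str.toList_join]
  have h : (("" : String).toList) = ([] : List Char) := by simp
  rw [h, pvJoin_flatten, List.map_map]
  congr 1
  refine List.map_congr_left (fun c hc => ?_)
  simp only [Function.comp_apply, PySem.Int.toList_toStr]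
  rw [pvGetD_comprehension _ _ c ((PySem.Set.mem_ofList _ _).mpr hc)]
  have : ((((PySem.List.index? word.toList c).getD 0 : Nat) : Int) + 1)
      = (((PySem.List.index? word.toList c).getD 0 + 1 : Nat) : Int) := by push_cast; ring
  rw [this, PySem.List.slice_to_natCast]
  simp [pvRank, PySem.Set.len]

-- ===== VERDICT (by name: the statement is the Claim_ definition above) =====
theorem generateOrderString_spec : Claim_equal_generateOrderString := by
  intro word _
  unfold Spec_generateOrderString
  refine String.ext ?_
  rw [pvA_toList, pvB_toList]
  have h0 : ([] : List Char) = PySem.Set.ofList [] := rfl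
  rw [h0, pvCanon_rank word.toList word.toList [] rfl]
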